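-- pv_equiv track=rewrite | github.com/HatimMuqbel/Decisiongraph-core-v1.3 | decisiongraph-complete/service/main.py | _select_schema_id_for_codes
-- ===== SOURCE A (Python) =====
-- def _select_schema_id_for_codes(reason_codes: list[str]) -> str:
--     """Select AML fingerprint schema based on reason code families."""
--     prefixes = {code.split("-")[1] for code in reason_codes if code.startswith("RC-") and "-" in code}
--     if "RPT" in prefixes:
--         return "decisiongraph:aml:report:v1"
--     if "SCR" in prefixes:
--         return "decisiongraph:aml:screening:v1"
--     if "KYC" in prefixes:
--         return "decisiongraph:aml:kyc:v1"
--     if "MON" in prefixes: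
--         return "decisiongraph:aml:monitoring:v1"
--     return "decisiongraph:aml:txn:v1"
-- ===== SOURCE B (Python) =====
-- _PRIORITY = [
--     ("RPT", "decisiongraph:aml:report:v1"),
--     ("SCR", "decisiongraph:aml:screening:v1"),
--     ("KYC", "decisiongraph:aml:kyc:v1"),
--     ("MON", "decisiongraph:aml:monitoring:v1"),
-- ]
--
--
-- def _select_schema_id_for_codes(reason_codes: list[str]) -> str:
--     """Select AML fingerprint schema based on reason code families."""
--     for prefix, schema in _PRIORITY:
--         if any(c.startswith("RC-") and c.split("-")[1] == prefix for c in reason_codes):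
--             return schema
--     return "decisiongraph:aml:txn:v1"
-- ===== Notes on version B (the rewrite author's own statement) =====
-- stated objective: alternative
-- what changed: Replaces building a set of all RC- prefixes followed by an if-chain with a priority table scanned in order, rescanning reason_codes per priority with any() and no intermediate set.
import Mathlib
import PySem

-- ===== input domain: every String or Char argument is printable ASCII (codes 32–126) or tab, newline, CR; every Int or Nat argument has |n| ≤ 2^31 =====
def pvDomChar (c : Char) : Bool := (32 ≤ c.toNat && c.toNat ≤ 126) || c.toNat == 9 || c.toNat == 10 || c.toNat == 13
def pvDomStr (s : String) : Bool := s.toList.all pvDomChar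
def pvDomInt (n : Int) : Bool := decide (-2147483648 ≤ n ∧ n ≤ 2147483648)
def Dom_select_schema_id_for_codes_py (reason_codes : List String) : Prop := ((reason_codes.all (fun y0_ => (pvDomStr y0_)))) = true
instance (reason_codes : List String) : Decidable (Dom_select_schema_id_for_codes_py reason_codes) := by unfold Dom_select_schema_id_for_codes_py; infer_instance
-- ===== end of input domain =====

-- B replaces A's prefix-set + if-chain by an ordered priority table scanned with a per-priority
-- rescan of reason_codes (objective: alternative decomposition, same cost).

-- ===== PORT A =====
-- code.split("-")[1]; the .getD "" is never reached because the comprehension's guard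
-- '"-" in code' guarantees the split has at least two pieces.
def pvSecondPiece (code : String) : String :=
  ((PySem.List.pyGet? (((PySem.Str.split? code "-").getD [])) 1).getD "")

def select_schema_id_for_codes_py (reason_codes : List String) : String :=
  let prefixes : PySem.Set String :=
    PySem.Set.ofList
      ((reason_codes.filter
          (fun code => PySem.Str.startswith code "RC-" && PySem.Str.isIn "-" code)).map
        pvSecondPiece)
  if PySem.Set.contains prefixes "RPT" then "decisiongraph:aml:report:v1"
  else if PySem.Set.contains prefixes "SCR" then "decisiongraph:aml:screening:v1"
  else if PySem.Set.contains prefixes "KYC" then "decisiongraph:aml:kyc:v1"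
  else if PySem.Set.contains prefixes "MON" then "decisiongraph:aml:monitoring:v1"
  else "decisiongraph:aml:txn:v1"

-- ===== PORT B =====
def pvPriority : List (String × String) :=
  [("RPT", "decisiongraph:aml:report:v1"),
   ("SCR", "decisiongraph:aml:screening:v1"),
   ("KYC", "decisiongraph:aml:kyc:v1"),
   ("MON", "decisiongraph:aml:monitoring:v1")]

-- any(c.startswith("RC-") and c.split("-")[1] == prefix for c in reason_codes);
-- the .getD "" is never reached: startswith "RC-" guarantees a "-" in c.
def pvMatches (reason_codes : List String) (pfx : String) : Bool :=
  reason_codes.any (fun c =>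
    PySem.Str.startswith c "RC-" &&
      (((PySem.List.pyGet? (((PySem.Str.split? c "-").getD [])) 1).getD "") == pfx))

def pvResolve (reason_codes : List String) : List (String × String) → String
  | [] => "decisiongraph:aml:txn:v1"
  | (pfx, schema) :: rest =>
      if pvMatches reason_codes pfx then schema else pvResolve reason_codes rest

def select_schema_id_for_codes_py_alt (reason_codes : List String) : String :=
  pvResolve reason_codes pvPriority

-- ===== PRECONDITION & SPEC =====
def Spec_select_schema_id_for_codes_py (reason_codes : List String) (out : String) : Prop := out = select_schema_id_for_codes_py_alt reason_codes
instance (reason_codes : List String) (out : String) : Decidable (Spec_select_schema_id_for_codes_py reason_codes out) := by unfold Spec_select_schema_id_for_codes_py; infer_instance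

-- ===== CLAIM (what is proved, stated in full; the proofs are below) =====
def Claim_equal_select_schema_id_for_codes_py : Prop := ∀ (reason_codes : List String), Dom_select_schema_id_for_codes_py reason_codes → Spec_select_schema_id_for_codes_py reason_codes (select_schema_id_for_codes_py reason_codes)

-- ===== LEMMAS AND PROOFS =====

-- a code starting with "RC-" contains "-"
lemma isIn_of_startswith (c : String) (h : PySem.Str.startswith c "RC-" = true) :
    PySem.Str.isIn "-" c = true := by
  rw [PySem.Str.isIn_iff_infix]
  have hp : ("RC-".toList) <+: c.toList := by
    have := PySem.Str.startswith_eq c "RC-"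
    rw [this] at h
    exact (PySem.Chars.startswith_iff _ _).mp h
  exact List.IsInfix.trans (l₂ := "RC-".toList) ⟨['R','C'], [], rfl⟩ hp.isInfix

-- membership in A's prefix set is exactly B's rescan predicate
lemma contains_eq_matches (rcs : List String) (p : String) :
    PySem.Set.contains
      (PySem.Set.ofList
        ((rcs.filter
            (fun code => PySem.Str.startswith code "RC-" && PySem.Str.isIn "-" code)).map
          pvSecondPiece)) p = pvMatches rcs p := by
  apply Bool.eq_iff_iff.mpr
  rw [PySem.Set.contains_iff, PySem.Set.mem_ofList]
  simp only [pvMatches, List.any_eq_true, List.mem_map, List.mem_filter,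
    Bool.and_eq_true, beq_iff_eq, pvSecondPiece]
  constructor
  · rintro ⟨c, ⟨hc, hs, _⟩, hg⟩
    exact ⟨c, hc, hs, hg⟩
  · rintro ⟨c, hc, hs, hg⟩
    exact ⟨c, ⟨hc, hs, isIn_of_startswith c hs⟩, hg⟩

-- ===== VERDICT (by name: the statement is the Claim_ definition above) =====
theorem select_schema_id_for_codes_py_spec : Claim_equal_select_schema_id_for_codes_py := by
  intro rcs _
  unfold Spec_select_schema_id_for_codes_py select_schema_id_for_codes_py
    select_schema_id_for_codes_py_alt
  simp only [contains_eq_matches, pvPriority, pvResolve]
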